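-- pv_equiv track=rewrite | github.com/DhruvJ2k4/emotion_model | webcam1.py | filter_and_select_emotion
-- ===== SOURCE A (Python) =====
-- from collections import Counter
-- from collections import Counter
--
-- def filter_and_select_emotion(emotions):
--     """
--     Processes a list of detected emotions:
--     Ignores "Neutral" if coupled with any negative emotion.
--     Returns the most frequent emotion, giving priority to later occurrences in case of a tie.
--     param emotions: List of detected emotions.
--     return: The selected dominant emotion.
--     """
--     NEGATIVE_EMOTIONS = {"Angry", "Disgust", "Fear", "Sad"}
--
--     #Ignore "Neutral" if a negative emotion is present
--     filtered_emotions = [e for e in emotions if e != "Neutral" or not any(ne in emotions for ne in NEGATIVE_EMOTIONS)]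
--     if not filtered_emotions:  #If all were "Neutral", keep it
--         filtered_emotions = emotions
--
--     #Count occurrences, giving priority to later occurrences in case of a tie
--     emotion_counts = Counter(filtered_emotions)
--     most_frequent = max(filtered_emotions, key=lambda e: (emotion_counts[e], emotions[::-1].index(e)))
--     return most_frequent
-- ===== SOURCE B (Python) =====
-- def filter_and_select_emotion(emotions):
--     """Single-backward-scan reimplementation: count every emotion once, decide
--     whether Neutral is dropped, then walk the list once from the end; each
--     value's first visit in that walk is its last occurrence, and a running
--     argmax with >= replacement yields A's (count, reversed-index) maximum.
--     No filtered list, no max()/sort, no repeated .index scans."""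
--     NEGATIVE = {"Angry", "Disgust", "Fear", "Sad"}
--     counts = {}
--     for e in emotions:
--         counts[e] = counts.get(e, 0) + 1
--     drop = any(e in NEGATIVE for e in counts)
--     best = None
--     seen = set()
--     for e in reversed(emotions):
--         if e in seen or (drop and e == "Neutral"):
--             continue
--         seen.add(e)
--         if best is None or counts[e] >= counts[best]:
--             best = e
--     return best
-- ===== Notes on version B (the rewrite author's own statement) =====
-- stated objective: faster
-- what changed: B never builds the filtered list or calls max(): it counts every emotion in one dict pass, decides the Neutral drop from the counter's keys, and then walks the list once from the end, where each value's first visit is its last occurrence, keeping a running argmax with >=-replacement instead of A's max() whose key recomputes emotions[::-1].index(e) (a reversal plus linear scan per element).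
import Mathlib
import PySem

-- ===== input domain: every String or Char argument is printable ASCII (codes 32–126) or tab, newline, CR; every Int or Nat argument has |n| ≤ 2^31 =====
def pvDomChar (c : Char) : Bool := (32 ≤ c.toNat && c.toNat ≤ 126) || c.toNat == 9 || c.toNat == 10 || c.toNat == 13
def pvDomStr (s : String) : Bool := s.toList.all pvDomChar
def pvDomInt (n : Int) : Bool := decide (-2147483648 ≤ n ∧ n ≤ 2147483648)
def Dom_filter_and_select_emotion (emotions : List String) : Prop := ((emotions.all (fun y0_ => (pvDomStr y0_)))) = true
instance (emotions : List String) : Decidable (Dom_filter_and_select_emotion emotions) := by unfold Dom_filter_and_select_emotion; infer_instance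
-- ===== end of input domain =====

-- B replaces A's filtered-list + max() with repeated reversed .index scans by one counting
-- pass and one backward scan keeping a running argmax (objective: faster).

-- ===== PORT A =====
def filter_and_select_emotion (emotions : List String) : String :=
  let negatives : PySem.Set String := PySem.Set.ofList ["Angry", "Disgust", "Fear", "Sad"]
  let filtered0 := emotions.filter (fun e =>
    decide (e ≠ "Neutral") || !(negatives.any (fun ne => emotions.contains ne)))
  let filtered := if filtered0 = [] then emotions else filtered0
  let counts := PySem.Dict.counter filtered
  -- emotions[::-1].index(e): e always occurs in emotions here, so .getD 0 is exact;
  -- max of the empty list raises in Python (excluded by Pre_), .getD "" is unreached there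
  (PySem.List.max2? filtered (fun e => counts.getD e 0)
      (fun e => (((PySem.List.index? emotions.reverse e).getD 0 : Nat) : Int))).getD ""

-- ===== PORT B =====
def filter_and_select_emotion_alt (emotions : List String) : String :=
  let negative : PySem.Set String := PySem.Set.ofList ["Angry", "Disgust", "Fear", "Sad"]
  let counts := emotions.foldl (fun d e => d.insert e (d.getD e 0 + 1))
      (PySem.Dict.empty : PySem.Dict String Int)
  -- 'any(e in NEGATIVE for e in counts)': iterating the dict's keys, order-independent
  let drop := counts.keys.any (fun e => negative.contains e)
  let res := emotions.reverse.foldl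
    (fun (st : Option String × PySem.Set String) e =>
      if st.2.contains e || (drop && e == "Neutral") then st
      else
        let seen := st.2.add e
        match st.1 with
        | none => (some e, seen)
        | some b => if counts.getD b 0 ≤ counts.getD e 0 then (some e, seen) else (some b, seen))
    ((none : Option String), (PySem.Set.empty : PySem.Set String))
  -- Python B returns None only on the empty list (excluded by Pre_); .getD "" is unreached there
  res.1.getD ""

-- ===== PRECONDITION & SPEC =====
-- Pre_ excludes only the empty list, on which Python A raises ValueError (max of empty sequence).
def Pre_filter_and_select_emotion (emotions : List String) : Prop := emotions ≠ []
instance (emotions : List String) : Decidable (Pre_filter_and_select_emotion emotions) := by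
  unfold Pre_filter_and_select_emotion; infer_instance
def pvWitness_filter_and_select_emotion : List String := ["Happy", "Sad", "Neutral", "Sad", "Happy"]

def Spec_filter_and_select_emotion (emotions : List String) (out : String) : Prop := out = filter_and_select_emotion_alt emotions
instance (emotions : List String) (out : String) : Decidable (Spec_filter_and_select_emotion emotions out) := by unfold Spec_filter_and_select_emotion; infer_instance

-- ===== CLAIM (what is proved, stated in full; the proofs are below) =====
def Claim_equal_filter_and_select_emotion : Prop := ∀ (emotions : List String), Dom_filter_and_select_emotion emotions → Pre_filter_and_select_emotion emotions → Spec_filter_and_select_emotion emotions (filter_and_select_emotion emotions)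

-- ===== LEMMAS AND PROOFS =====

-- Python's lexicographic "tuple key a < tuple key b" test, as max2? uses it
def pvLtB (k1 k2 : String → Int) (a b : String) : Bool :=
  decide (k1 a < k1 b) || (!decide (k1 b < k1 a) && decide (k2 a < k2 b))

theorem pvLtB_irrefl (k1 k2 : String → Int) (a : String) : pvLtB k1 k2 a a = false := by
  simp [pvLtB]

theorem pvLtB_trans1 (k1 k2 : String → Int) {a x m : String}
    (h1 : pvLtB k1 k2 a x = true) (h2 : pvLtB k1 k2 m x = false) :
    pvLtB k1 k2 m a = false := by
  simp [pvLtB] at *; omega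

theorem pvLtB_trans2 (k1 k2 : String → Int) {a x m : String}
    (h1 : pvLtB k1 k2 a x = false) (h2 : pvLtB k1 k2 m a = false) :
    pvLtB k1 k2 m x = false := by
  simp [pvLtB] at *; omega

theorem pvLtB_antisymm (k1 k2 : String → Int) {a b : String}
    (h1 : pvLtB k1 k2 a b = false) (h2 : pvLtB k1 k2 b a = false) :
    k1 a = k1 b ∧ k2 a = k2 b := by
  simp [pvLtB] at *; omega

theorem pvLtB_congr {k1 k2 g1 g2 : String → Int} {a b : String}
    (h1 : k1 a = g1 a) (h2 : k1 b = g1 b) (h3 : k2 a = g2 a) (h4 : k2 b = g2 b) :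
    pvLtB k1 k2 a b = pvLtB g1 g2 a b := by
  simp [pvLtB, h1, h2, h3, h4]

-- max2? is the fold with pvLtB
theorem max2?_eq_fold (xs : List String) (k1 k2 : String → Int) :
    PySem.List.max2? xs k1 k2 =
      xs.foldl (fun acc x => match acc with
        | none => some x
        | some m => if pvLtB k1 k2 m x then some x else some m) none := by
  unfold PySem.List.max2?
  congr 1
  funext acc x
  cases acc <;> simp [pvLtB]

theorem max_fold_spec (k1 k2 : String → Int) :
    ∀ (xs : List String) (a m : String),
      xs.foldl (fun acc x => match acc with
        | none => some x
        | some m => if pvLtB k1 k2 m x then some x else some m) (some a) = some m →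
      (m = a ∨ m ∈ xs) ∧ pvLtB k1 k2 m a = false ∧ ∀ y ∈ xs, pvLtB k1 k2 m y = false := by
  intro xs
  induction xs with
  | nil => intro a m h; simp at h; subst h; simp [pvLtB_irrefl]
  | cons x t ih =>
    intro a m h
    simp only [List.foldl_cons] at h
    by_cases hax : pvLtB k1 k2 a x = true
    · rw [if_pos hax] at h
      obtain ⟨hm, hmx, hall⟩ := ih x m h
      have hma : pvLtB k1 k2 m a = false := pvLtB_trans1 k1 k2 hax hmx
      refine ⟨by simp only [List.mem_cons]; tauto, hma, ?_⟩
      intro y hy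
      rcases List.mem_cons.mp hy with h' | h'
      · exact h' ▸ hmx
      · exact hall y h'
    · rw [if_neg hax] at h
      obtain ⟨hm, hma, hall⟩ := ih a m h
      have hax' : pvLtB k1 k2 a x = false := by simpa using hax
      have hmx : pvLtB k1 k2 m x = false := pvLtB_trans2 k1 k2 hax' hma
      refine ⟨by simp only [List.mem_cons]; tauto, hma, ?_⟩
      intro y hy
      rcases List.mem_cons.mp hy with h' | h'
      · exact h' ▸ hmx
      · exact hall y h'

-- the max fold from a some accumulator always returns some
theorem fold_max_some (k1 k2 : String → Int) :
    ∀ (t : List String) (a : String), ∃ m,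
      t.foldl (fun acc x => match acc with
        | none => some x
        | some m => if pvLtB k1 k2 m x then some x else some m) (some a) = some m := by
  intro t
  induction t with
  | nil => intro a; exact ⟨a, rfl⟩
  | cons x t' ih =>
    intro a
    simp only [List.foldl_cons]
    by_cases h : pvLtB k1 k2 a x = true
    · rw [if_pos h]; exact ih x
    · rw [if_neg h]; exact ih a

-- reversed index is injective on members
theorem revIndex_inj {xs : List String} {a b : String}
    (ha : a ∈ xs) (hb : b ∈ xs)
    (h : ((PySem.List.index? xs.reverse a).getD 0 : Nat) = (PySem.List.index? xs.reverse b).getD 0) :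
    a = b := by
  obtain ⟨ka, hka⟩ := Option.isSome_iff_exists.mp
    ((PySem.List.index?_isSome_iff xs.reverse a).mpr (by simpa using ha))
  obtain ⟨kb, hkb⟩ := Option.isSome_iff_exists.mp
    ((PySem.List.index?_isSome_iff xs.reverse b).mpr (by simpa using hb))
  obtain ⟨hlta, hgeta, -⟩ := PySem.List.getElem_of_index?_eq_some hka
  obtain ⟨hltb, hgetb, -⟩ := PySem.List.getElem_of_index?_eq_some hkb
  rw [hka, hkb] at h
  simp only [Option.getD_some] at h
  subst h
  rw [← hgeta, ← hgetb]

-- first-occurrence index of a member of the prefix stays below its length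
theorem index?_lt_of_mem_prefix {pre l : List String} {b : String} (hb : b ∈ pre) :
    ∃ k, PySem.List.index? (pre ++ l) b = some k ∧ k < pre.length := by
  rw [PySem.List.index?_append_of_mem l hb]
  obtain ⟨k, hk⟩ := Option.isSome_iff_exists.mp ((PySem.List.index?_isSome_iff pre b).mpr hb)
  obtain ⟨hklt, -, -⟩ := PySem.List.getElem_of_index?_eq_some hk
  exact ⟨k, hk, hklt⟩

-- first-occurrence index of a non-prefix member lies at or beyond the prefix
theorem index?_ge_of_not_mem_prefix {pre l : List String} {e : String}
    (he : e ∈ pre ++ l) (hpre : e ∉ pre) :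
    ∃ k, PySem.List.index? (pre ++ l) e = some k ∧ pre.length ≤ k := by
  obtain ⟨k, hk⟩ := Option.isSome_iff_exists.mp ((PySem.List.index?_isSome_iff (pre ++ l) e).mpr he)
  obtain ⟨hklt, hget, -⟩ := PySem.List.getElem_of_index?_eq_some hk
  refine ⟨k, hk, ?_⟩
  by_contra hlt
  rw [Nat.not_le] at hlt
  apply hpre
  rw [← hget, List.getElem_append_left hlt]
  exact List.getElem_mem _

-- the backward scan of B: folding the remaining suffix keeps the running best the
-- pvLtB-maximum (count, then reversed first-occurrence index) of the candidates seen so far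
theorem bscan_inv (counts : PySem.Dict String Int) (drop : Bool) (full : List String) :
    ∀ (l pre : List String) (best : Option String) (seen : PySem.Set String),
      full = pre ++ l →
      (∀ y, y ∈ seen ↔ (y ∈ pre ∧ (drop && y == "Neutral") = false)) →
      (best = none → ∀ y ∈ pre, (drop && y == "Neutral") = true) →
      (∀ b, best = some b → b ∈ pre ∧ (drop && b == "Neutral") = false ∧
        ∀ y ∈ pre, (drop && y == "Neutral") = false →
          pvLtB (fun e => counts.getD e 0)
            (fun e => (((PySem.List.index? full e).getD 0 : Nat) : Int)) b y = false) →
      (match (l.foldl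
          (fun (st : Option String × PySem.Set String) e =>
            if st.2.contains e || (drop && e == "Neutral") then st
            else
              let seen := st.2.add e
              match st.1 with
              | none => (some e, seen)
              | some b => if counts.getD b 0 ≤ counts.getD e 0 then (some e, seen)
                          else (some b, seen))
          (best, seen)).1 with
       | none => ∀ y ∈ full, (drop && y == "Neutral") = true
       | some m => m ∈ full ∧ (drop && m == "Neutral") = false ∧
         ∀ y ∈ full, (drop && y == "Neutral") = false →
           pvLtB (fun e => counts.getD e 0)
             (fun e => (((PySem.List.index? full e).getD 0 : Nat) : Int)) m y = false) := by
  intro l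
  induction l with
  | nil =>
    intro pre best seen hfull hseen hnone hsome
    simp only [List.foldl_nil]
    match best with
    | none => exact fun y hy => hnone rfl y (by simpa [hfull] using hy)
    | some b =>
      obtain ⟨hb1, hb2, hb3⟩ := hsome b rfl
      refine ⟨by simp [hfull, hb1], hb2, fun y hy hyc => hb3 y (by simpa [hfull] using hy) hyc⟩
  | cons e l' ih =>
    intro pre best seen hfull hseen hnone hsome
    simp only [List.foldl_cons]
    by_cases hguard : (seen.contains e || (drop && e == "Neutral")) = true
    · rw [if_pos hguard]
      refine ih (pre ++ [e]) best seen (by simp [hfull]) ?_ ?_ ?_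
      · intro y
        rw [hseen y]
        constructor
        · rintro ⟨hy, hyc⟩; exact ⟨by simp [hy], hyc⟩
        · rintro ⟨hy, hyc⟩
          rcases (List.mem_append.mp hy) with hy | hy
          · exact ⟨hy, hyc⟩
          · -- y = e; the guard says e ∈ seen or e is skipped
            simp only [List.mem_singleton] at hy
            subst hy
            rcases Bool.or_eq_true_iff.mp hguard with hg | hg
            · exact ⟨((hseen y).mp (by simpa [PySem.Set.contains_iff] using hg)).1, hyc⟩
            · exact absurd hg (by simp [hyc])
      · intro hb y hy
        rcases List.mem_append.mp hy with hy | hy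
        · exact hnone hb y hy
        · simp only [List.mem_singleton] at hy
          subst hy
          rcases Bool.or_eq_true_iff.mp hguard with hg | hg
          · have hh := (hseen y).mp (by simpa [PySem.Set.contains_iff] using hg)
            exact absurd (hnone hb y hh.1) (by simp [hh.2])
          · exact hg
      · intro b hb
        obtain ⟨hb1, hb2, hb3⟩ := hsome b hb
        refine ⟨by simp [hb1], hb2, ?_⟩
        intro y hy hyc
        rcases List.mem_append.mp hy with hy | hy
        · exact hb3 y hy hyc
        · simp only [List.mem_singleton] at hy
          subst hy
          rcases Bool.or_eq_true_iff.mp hguard with hg | hg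
          · exact hb3 y ((hseen y).mp (by simpa [PySem.Set.contains_iff] using hg)).1 hyc
          · exact absurd hg (by simp [hyc])
    · rw [if_neg hguard]
      have hnotseen : e ∉ seen := by
        intro h
        exact hguard (by simp; exact Or.inl h)
      have hskipe : (drop && e == "Neutral") = false := by
        by_cases h : (drop && e == "Neutral") = true
        · exact absurd (by simp [h]) hguard
        · simpa using h
      have hnotpre : e ∉ pre := fun h => hnotseen ((hseen e).mpr ⟨h, hskipe⟩)
      have hseen' : ∀ y, y ∈ seen.add e ↔ (y ∈ pre ++ [e] ∧ (drop && y == "Neutral") = false) := by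
        intro y
        rw [PySem.Set.mem_add, hseen y]
        constructor
        · rintro (⟨hy, hyc⟩ | rfl)
          · exact ⟨by simp [hy], hyc⟩
          · exact ⟨by simp, hskipe⟩
        · rintro ⟨hy, hyc⟩
          rcases List.mem_append.mp hy with hy | hy
          · exact Or.inl ⟨hy, hyc⟩
          · simp only [List.mem_singleton] at hy; exact Or.inr hy
      -- e's reversed first-occurrence index is beyond every prefix member's
      have hk2e : ∃ k, PySem.List.index? full e = some k ∧ pre.length ≤ k := by
        rw [hfull]
        exact index?_ge_of_not_mem_prefix (by simp) hnotpre
      match hbest : best with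
      | none =>
        dsimp only
        refine ih (pre ++ [e]) (some e) (seen.add e) (by simp [hfull]) hseen' (by simp) ?_
        intro b hb
        injection hb with hb; subst hb
        refine ⟨by simp, hskipe, ?_⟩
        intro y hy hyc
        rcases List.mem_append.mp hy with hy | hy
        · exact absurd (hnone rfl y hy) (by simp [hyc])
        · simp only [List.mem_singleton] at hy
          subst hy
          exact pvLtB_irrefl _ _ _
      | some b =>
        dsimp only
        obtain ⟨hb1, hb2, hb3⟩ := hsome b rfl
        obtain ⟨ke, hke, hkeg⟩ := hk2e
        obtain ⟨kb, hkb, hkbl⟩ : ∃ k, PySem.List.index? full b = some k ∧ k < pre.length := by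
          rw [hfull]; exact index?_lt_of_mem_prefix hb1
        by_cases hcmp : counts.getD b 0 ≤ counts.getD e 0
        · rw [if_pos hcmp]
          refine ih (pre ++ [e]) (some e) (seen.add e) (by simp [hfull]) hseen'
            (by intro h; exact absurd h (by simp)) ?_
          intro b' hb'
          injection hb' with hb'; subst hb'
          refine ⟨by simp, hskipe, ?_⟩
          intro y hy hyc
          rcases List.mem_append.mp hy with hy | hy
          · have hby := hb3 y hy hyc
            obtain ⟨ky, hky, hkyl⟩ : ∃ k, PySem.List.index? full y = some k ∧ k < pre.length := by
              rw [hfull]; exact index?_lt_of_mem_prefix hy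
            simp only [pvLtB, hky, hkb, hke, Option.getD_some] at hby ⊢
            simp only [Bool.or_eq_false_iff, Bool.and_eq_false_iff, decide_eq_false_iff_not,
              not_lt, Bool.not_eq_false', decide_eq_true_eq] at hby ⊢
            omega
          · simp only [List.mem_singleton] at hy
            subst hy
            exact pvLtB_irrefl _ _ _
        · rw [if_neg hcmp]
          refine ih (pre ++ [e]) (some b) (seen.add e) (by simp [hfull]) hseen'
            (by intro h; exact absurd h (by simp)) ?_
          intro b' hb'
          injection hb' with hb'; subst hb'
          refine ⟨by simp [hb1], hb2, ?_⟩
          intro y hy hyc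
          rcases List.mem_append.mp hy with hy | hy
          · exact hb3 y hy hyc
          · simp only [List.mem_singleton] at hy
            subst hy
            simp only [pvLtB, hkb, hke, Option.getD_some] at ⊢
            simp only [Bool.or_eq_false_iff, Bool.and_eq_false_iff, decide_eq_false_iff_not,
              not_lt, Bool.not_eq_false', decide_eq_true_eq]
            omega

-- B's 'any(e in NEGATIVE for e in counts)' agrees with A's 'any(ne in emotions for ne in NEGATIVE)'
theorem drop_eq (emotions : List String) :
    ((emotions.foldl (fun d e => d.insert e (d.getD e 0 + 1))
        (PySem.Dict.empty : PySem.Dict String Int)).keys.any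
      (fun e => (PySem.Set.ofList ["Angry", "Disgust", "Fear", "Sad"] : PySem.Set String).contains e))
    = ((PySem.Set.ofList ["Angry", "Disgust", "Fear", "Sad"] : PySem.Set String).any
      (fun ne => emotions.contains ne)) := by
  rw [PySem.Dict.foldl_insert_getD_add_one_eq_counter, PySem.Dict.keys_counter]
  have hset : (PySem.Set.ofList ["Angry", "Disgust", "Fear", "Sad"] : PySem.Set String)
      = ["Angry", "Disgust", "Fear", "Sad"] := by decide
  rw [Bool.eq_iff_iff]
  simp only [List.any_eq_true, hset, List.contains_eq_mem, decide_eq_true_eq,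
    PySem.Set.mem_ofList, PySem.Set.contains_iff]
  constructor
  · rintro ⟨x, hx, h⟩; exact ⟨x, h, hx⟩
  · rintro ⟨x, hx, h⟩; exact ⟨x, h, hx⟩

theorem ports_agree (emotions : List String) (hpre : emotions ≠ []) :
    filter_and_select_emotion emotions = filter_and_select_emotion_alt emotions := by
  simp only [filter_and_select_emotion, filter_and_select_emotion_alt]
  rw [drop_eq, PySem.Dict.foldl_insert_getD_add_one_eq_counter]
  set drop := ((PySem.Set.ofList ["Angry", "Disgust", "Fear", "Sad"] : PySem.Set String).any
    (fun ne => emotions.contains ne)) with hdrop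
  -- the two filter predicates agree
  have hpred : ∀ e, (decide (e ≠ "Neutral") ||
      !((PySem.Set.ofList ["Angry", "Disgust", "Fear", "Sad"] : PySem.Set String).any
        (fun ne => emotions.contains ne))) = !(drop && e == "Neutral") := by
    intro e
    rw [← hdrop]
    cases drop <;> by_cases he : e = "Neutral" <;> simp [he]
  rw [List.filter_congr (fun e _ => hpred e)]
  set f := emotions.filter (fun e => !(drop && e == "Neutral")) with hf
  -- the filtered list is empty only when emotions is
  have hfne : f ≠ [] := by
    by_cases hd : drop = true
    · have : ∃ ne ∈ (["Angry", "Disgust", "Fear", "Sad"] : List String), ne ∈ emotions := by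
        have hset : (PySem.Set.ofList ["Angry", "Disgust", "Fear", "Sad"] : PySem.Set String)
            = ["Angry", "Disgust", "Fear", "Sad"] := by decide
        rw [hdrop, hset] at hd
        simpa [List.any_eq_true] using hd
      obtain ⟨ne, hne, hmem⟩ := this
      have hnn : (ne == "Neutral") = false := by
        fin_cases hne <;> decide
      have : ne ∈ f := by
        rw [hf, List.mem_filter]
        exact ⟨hmem, by simp [hnn]⟩
      exact fun h => by simp [h] at this
    · have hd' : drop = false := by simpa using hd
      rw [hf, hd']
      simpa using hpre
  rw [if_neg hfne]
  -- keys
  set k1A : String → Int := fun e => (PySem.Dict.counter f).getD e 0 with hk1A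
  set k2 : String → Int :=
    fun e => (((PySem.List.index? emotions.reverse e).getD 0 : Nat) : Int) with hk2
  set k1B : String → Int := fun e => (PySem.Dict.counter emotions).getD e 0 with hk1B
  have hcand : ∀ y, y ∈ f ↔ (y ∈ emotions ∧ (drop && y == "Neutral") = false) := by
    intro y
    rw [hf, List.mem_filter]
    constructor
    · rintro ⟨h1, h2⟩
      refine ⟨h1, ?_⟩
      simp only [Bool.not_eq_eq_eq_not, Bool.not_true] at h2
      exact h2
    · rintro ⟨h1, h2⟩
      refine ⟨h1, ?_⟩
      simp only [Bool.not_eq_eq_eq_not, Bool.not_true]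
      exact h2
  have hk1 : ∀ y, (drop && y == "Neutral") = false → k1A y = k1B y := by
    intro y hy
    rw [hk1A, hk1B]
    simp only [PySem.Dict.getD_counter, hf]
    rw [List.count_filter (by simp [hy])]
  -- A's result
  obtain ⟨h0, t0, hft⟩ := List.exists_cons_of_ne_nil hfne
  rw [max2?_eq_fold]
  obtain ⟨r, hr⟩ : ∃ r, (f.foldl (fun acc x => match acc with
      | none => some x
      | some m => if pvLtB k1A k2 m x then some x else some m) none) = some r := by
    rw [hft, List.foldl_cons]
    exact fold_max_some k1A k2 t0 h0
  obtain ⟨hrmem0, hrh0, hrall0⟩ := max_fold_spec k1A k2 t0 h0 r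
    (by rw [hft, List.foldl_cons] at hr; exact hr)
  have hrmem : r ∈ f := by rw [hft]; rcases hrmem0 with h | h <;> simp [h]
  have hrall : ∀ y ∈ f, pvLtB k1A k2 r y = false := by
    intro y hy
    rw [hft] at hy
    rcases List.mem_cons.mp hy with h | h
    · exact h ▸ hrh0
    · exact hrall0 y h
  -- B's result, via the backward-scan invariant
  have hb := bscan_inv (PySem.Dict.counter emotions) drop emotions.reverse emotions.reverse
    [] none PySem.Set.empty (by simp) (by intro y; simp [PySem.Set.empty]) (by simp)
    (by intro b h; exact absurd h (by simp))
  match hres : (emotions.reverse.foldl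
      (fun (st : Option String × PySem.Set String) e =>
        if st.2.contains e || (drop && e == "Neutral") then st
        else
          let seen := st.2.add e
          match st.1 with
          | none => (some e, seen)
          | some b => if (PySem.Dict.counter emotions).getD b 0 ≤ (PySem.Dict.counter emotions).getD e 0
                      then (some e, seen) else (some b, seen))
      ((none : Option String), (PySem.Set.empty : PySem.Set String))).1 with
  | none =>
    rw [hres] at hb
    exfalso
    have h0f := (hcand h0).mp (by rw [hft]; simp)
    exact absurd (hb h0 (by simpa using h0f.1)) (by simp [h0f.2])
  | some m =>
    rw [hres] at hb
    obtain ⟨hm1, hm2, hm3⟩ := hb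
    have hmemo : m ∈ emotions := by simpa using hm1
    have hmf : m ∈ f := (hcand m).mpr ⟨hmemo, hm2⟩
    have hrcand := (hcand r).mp hrmem
    -- r is not below m (A's maximality), m is not below r (B's maximality)
    have h1 : pvLtB k1A k2 r m = false := hrall m hmf
    have h2 : pvLtB k1A k2 m r = false := by
      rw [pvLtB_congr (hk1 m hm2) (hk1 r hrcand.2) rfl rfl]
      exact hm3 r (by simpa using hrcand.1) hrcand.2
    obtain ⟨-, hkeq⟩ := pvLtB_antisymm k1A k2 h2 h1
    have hrm : r = m := by
      refine (revIndex_inj hmemo hrcand.1 ?_).symm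
      have h3 : ((((PySem.List.index? emotions.reverse m).getD 0 : Nat)) : Int)
          = (((PySem.List.index? emotions.reverse r).getD 0 : Nat) : Int) := by
        simpa [hk2] using hkeq
      exact_mod_cast h3
    rw [hr, hrm]

-- ===== VERDICT (by name: the statement is the Claim_ definition above) =====
theorem filter_and_select_emotion_spec : Claim_equal_filter_and_select_emotion := by
  intro emotions _ hpre
  unfold Spec_filter_and_select_emotion
  exact ports_agree emotions hpre
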